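-- pv_equiv track=rewrite | github.com/deluair/agents_child | agent/knowledge/relation_extractor.py | _infer_relation_type
-- ===== SOURCE A (Python) =====
-- from typing import Dict, Any, List, Optional, Tuple
--
-- def _infer_relation_type(entity1: Dict[str, Any], entity2: Dict[str, Any], text: str) -> Optional[str]:
--     """Infer relation type based on entity types and context"""
--
--     type1 = entity1.get("type", "")
--     type2 = entity2.get("type", "")
--     text_lower = text.lower()
--
--     # Person-Organization relations
--     if (type1 == "person" and type2 == "organization") or (type1 == "organization" and type2 == "person"):
--         if any(word in text_lower for word in ["work", "job", "employee", "staff"]):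
--             return "works_for" if type1 == "person" else "employs"
--
--     # Organization-Location relations
--     if (type1 == "organization" and type2 == "location") or (type1 == "location" and type2 == "organization"):
--         if any(word in text_lower for word in ["located", "based", "headquarters"]):
--             return "located_in" if type1 == "organization" else "contains"
--
--     # Person-Person relations
--     if type1 == "person" and type2 == "person":
--         if any(word in text_lower for word in ["family", "married", "parent", "child"]):
--             return "related_to"
--
--     return "associated_with"  # Generic relation
-- ===== SOURCE B (Python) =====
-- from typing import Dict, Any, List, Optional, Tuple
--
-- # Keyword groups: which "topics" a text can signal.
-- _TOPIC_KEYWORDS = [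
--     ("employment", ["work", "job", "employee", "staff"]),
--     ("location", ["located", "based", "headquarters"]),
--     ("family", ["family", "married", "parent", "child"]),
-- ]
--
-- # Flat rule list: (subject type, object type, required topic, relation).
-- _PAIR_RULES = [
--     ("person", "organization", "employment", "works_for"),
--     ("organization", "person", "employment", "employs"),
--     ("organization", "location", "location", "located_in"),
--     ("location", "organization", "location", "contains"),
--     ("person", "person", "family", "related_to"),
-- ]
--
-- def _infer_relation_type(entity1: Dict[str, Any], entity2: Dict[str, Any], text: str) -> Optional[str]:
--     """Classify the text into topics first, then scan the flat rule list."""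
--     text_lower = text.lower()
--     topics = {topic for topic, keywords in _TOPIC_KEYWORDS
--               if any(k in text_lower for k in keywords)}
--     pair = (entity1.get("type", ""), entity2.get("type", ""))
--     for subj, obj, topic, relation in _PAIR_RULES:
--         if pair == (subj, obj) and topic in topics:
--             return relation
--     return "associated_with"
-- ===== Notes on version B (the rewrite author's own statement) =====
-- stated objective: alternative
-- what changed: Inverted the decomposition: B first classifies the text into a set of fired topics (employment/location/family) in one staged pass over all keyword groups, then linearly scans a flat rule list of (subject,object,topic,relation) quadruples for the first rule whose pair matches and whose topic fired, instead of A's type-first if-cascade with lazy per-branch keyword checks.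
import Mathlib
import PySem

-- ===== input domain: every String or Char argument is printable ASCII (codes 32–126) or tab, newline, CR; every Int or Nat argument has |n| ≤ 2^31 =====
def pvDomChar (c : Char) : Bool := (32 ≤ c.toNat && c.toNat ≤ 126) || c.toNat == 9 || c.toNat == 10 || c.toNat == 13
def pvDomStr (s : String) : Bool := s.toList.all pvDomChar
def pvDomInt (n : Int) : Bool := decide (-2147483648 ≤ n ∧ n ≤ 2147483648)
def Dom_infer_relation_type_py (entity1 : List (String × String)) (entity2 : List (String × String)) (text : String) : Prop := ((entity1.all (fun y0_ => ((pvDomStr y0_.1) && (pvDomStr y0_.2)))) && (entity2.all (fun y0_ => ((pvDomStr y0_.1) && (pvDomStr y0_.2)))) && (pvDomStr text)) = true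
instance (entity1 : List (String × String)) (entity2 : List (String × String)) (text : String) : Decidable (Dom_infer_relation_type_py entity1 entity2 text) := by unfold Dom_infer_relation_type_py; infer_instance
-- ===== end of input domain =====

-- B classifies the text into a topic set first, then scans a flat rule list; same return value everywhere (alternative decomposition, not faster).

-- ===== PORT A =====
def infer_relation_type_py (entity1 : List (String × String)) (entity2 : List (String × String)) (text : String) : Option String :=
  let type1 := (PySem.Dict.mk entity1).getD "type" ""
  let type2 := (PySem.Dict.mk entity2).getD "type" ""
  let text_lower := PySem.Str.lower text
  -- Person-Organization relations
  if (type1 = "person" ∧ type2 = "organization") ∨ (type1 = "organization" ∧ type2 = "person") then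
    if (["work", "job", "employee", "staff"].any fun word => PySem.Str.isIn word text_lower) then
      some (if type1 = "person" then "works_for" else "employs")
    else
      -- fall through to the next checks, as in A
      if (type1 = "organization" ∧ type2 = "location") ∨ (type1 = "location" ∧ type2 = "organization") then
        if (["located", "based", "headquarters"].any fun word => PySem.Str.isIn word text_lower) then
          some (if type1 = "organization" then "located_in" else "contains")
        else if type1 = "person" ∧ type2 = "person" then
          if (["family", "married", "parent", "child"].any fun word => PySem.Str.isIn word text_lower) then
            some "related_to"
          else some "associated_with"
        else some "associated_with"
      else if type1 = "person" ∧ type2 = "person" then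
        if (["family", "married", "parent", "child"].any fun word => PySem.Str.isIn word text_lower) then
          some "related_to"
        else some "associated_with"
      else some "associated_with"
  else
    if (type1 = "organization" ∧ type2 = "location") ∨ (type1 = "location" ∧ type2 = "organization") then
      if (["located", "based", "headquarters"].any fun word => PySem.Str.isIn word text_lower) then
        some (if type1 = "organization" then "located_in" else "contains")
      else if type1 = "person" ∧ type2 = "person" then
        if (["family", "married", "parent", "child"].any fun word => PySem.Str.isIn word text_lower) then
          some "related_to"
        else some "associated_with"
      else some "associated_with"
    else if type1 = "person" ∧ type2 = "person" then
      if (["family", "married", "parent", "child"].any fun word => PySem.Str.isIn word text_lower) then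
        some "related_to"
      else some "associated_with"
    else some "associated_with"

-- ===== PORT B =====
-- Keyword groups: which "topics" a text can signal.
def pvTopicKeywords : List (String × List String) :=
  [ ("employment", ["work", "job", "employee", "staff"])
  , ("location", ["located", "based", "headquarters"])
  , ("family", ["family", "married", "parent", "child"]) ]

-- Flat rule list: (subject type, object type, required topic, relation).
def pvPairRules : List (String × String × String × String) :=
  [ ("person", "organization", "employment", "works_for")
  , ("organization", "person", "employment", "employs")
  , ("organization", "location", "location", "located_in")
  , ("location", "organization", "location", "contains")
  , ("person", "person", "family", "related_to") ]

-- the topic-set comprehension of Source B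
def pvTopicsOf (text : String) : PySem.Set String :=
  PySem.Set.ofList ((pvTopicKeywords.filter
    (fun p => p.2.any fun k => PySem.Str.isIn k (PySem.Str.lower text))).map Prod.fst)

-- the 'for … return … / return default' loop of Source B ([] = the default after the loop)
def pvScanRules (pair : String × String) (topics : PySem.Set String) :
    List (String × String × String × String) → Option String
  | [] => some "associated_with"
  | (subj, obj, topic, rel) :: rest =>
      if pair = (subj, obj) ∧ PySem.Set.contains topics topic then some rel
      else pvScanRules pair topics rest

def infer_relation_type_py_alt (entity1 : List (String × String)) (entity2 : List (String × String)) (text : String) : Option String :=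
  let topics : PySem.Set String := pvTopicsOf text
  let pair := ((PySem.Dict.mk entity1).getD "type" "", (PySem.Dict.mk entity2).getD "type" "")
  pvScanRules pair topics pvPairRules

-- ===== PRECONDITION & SPEC =====
def Spec_infer_relation_type_py (entity1 : List (String × String)) (entity2 : List (String × String)) (text : String) (out : Option String) : Prop := out = infer_relation_type_py_alt entity1 entity2 text
instance (entity1 : List (String × String)) (entity2 : List (String × String)) (text : String) (out : Option String) : Decidable (Spec_infer_relation_type_py entity1 entity2 text out) := by unfold Spec_infer_relation_type_py; infer_instance

-- ===== CLAIM (what is proved, stated in full; the proofs are below) =====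
def Claim_equal_infer_relation_type_py : Prop := ∀ (entity1 : List (String × String)) (entity2 : List (String × String)) (text : String), Dom_infer_relation_type_py entity1 entity2 text → Spec_infer_relation_type_py entity1 entity2 text (infer_relation_type_py entity1 entity2 text)

-- ===== LEMMAS AND PROOFS =====


theorem pv_cont_emp (text : String) :
    PySem.Set.contains (pvTopicsOf text) "employment"
      = (["work", "job", "employee", "staff"].any fun word => PySem.Str.isIn word (PySem.Str.lower text)) := by
  unfold pvTopicsOf pvTopicKeywords
  cases h1 : (["work", "job", "employee", "staff"].any fun k => PySem.Str.isIn k (PySem.Str.lower text)) <;>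
  cases h2 : (["located", "based", "headquarters"].any fun k => PySem.Str.isIn k (PySem.Str.lower text)) <;>
  cases h3 : (["family", "married", "parent", "child"].any fun k => PySem.Str.isIn k (PySem.Str.lower text)) <;>
    (simp only [List.filter_cons, List.filter_nil, h1, h2, h3]; decide)

theorem pv_cont_loc (text : String) :
    PySem.Set.contains (pvTopicsOf text) "location"
      = (["located", "based", "headquarters"].any fun word => PySem.Str.isIn word (PySem.Str.lower text)) := by
  unfold pvTopicsOf pvTopicKeywords
  cases h1 : (["work", "job", "employee", "staff"].any fun k => PySem.Str.isIn k (PySem.Str.lower text)) <;>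
  cases h2 : (["located", "based", "headquarters"].any fun k => PySem.Str.isIn k (PySem.Str.lower text)) <;>
  cases h3 : (["family", "married", "parent", "child"].any fun k => PySem.Str.isIn k (PySem.Str.lower text)) <;>
    (simp only [List.filter_cons, List.filter_nil, h1, h2, h3]; decide)

theorem pv_cont_fam (text : String) :
    PySem.Set.contains (pvTopicsOf text) "family"
      = (["family", "married", "parent", "child"].any fun word => PySem.Str.isIn word (PySem.Str.lower text)) := by
  unfold pvTopicsOf pvTopicKeywords
  cases h1 : (["work", "job", "employee", "staff"].any fun k => PySem.Str.isIn k (PySem.Str.lower text)) <;>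
  cases h2 : (["located", "based", "headquarters"].any fun k => PySem.Str.isIn k (PySem.Str.lower text)) <;>
  cases h3 : (["family", "married", "parent", "child"].any fun k => PySem.Str.isIn k (PySem.Str.lower text)) <;>
    (simp only [List.filter_cons, List.filter_nil, h1, h2, h3]; decide)

-- Both ports depend on the entities only through the two looked-up type strings;
-- prove agreement pointwise over those two strings and the three keyword-group booleans.
set_option maxHeartbeats 4000000 in
theorem pv_core (t1 t2 text : String) :
    (let type1 := t1
     let type2 := t2
     let text_lower := PySem.Str.lower text
     if (type1 = "person" ∧ type2 = "organization") ∨ (type1 = "organization" ∧ type2 = "person") then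
       if (["work", "job", "employee", "staff"].any fun word => PySem.Str.isIn word text_lower) then
         some (if type1 = "person" then "works_for" else "employs")
       else
         if (type1 = "organization" ∧ type2 = "location") ∨ (type1 = "location" ∧ type2 = "organization") then
           if (["located", "based", "headquarters"].any fun word => PySem.Str.isIn word text_lower) then
             some (if type1 = "organization" then "located_in" else "contains")
           else if type1 = "person" ∧ type2 = "person" then
             if (["family", "married", "parent", "child"].any fun word => PySem.Str.isIn word text_lower) then
               some "related_to"
             else some "associated_with"
           else some "associated_with"
         else if type1 = "person" ∧ type2 = "person" then
           if (["family", "married", "parent", "child"].any fun word => PySem.Str.isIn word text_lower) then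
             some "related_to"
           else some "associated_with"
         else some "associated_with"
     else
       if (type1 = "organization" ∧ type2 = "location") ∨ (type1 = "location" ∧ type2 = "organization") then
         if (["located", "based", "headquarters"].any fun word => PySem.Str.isIn word text_lower) then
           some (if type1 = "organization" then "located_in" else "contains")
         else if type1 = "person" ∧ type2 = "person" then
           if (["family", "married", "parent", "child"].any fun word => PySem.Str.isIn word text_lower) then
             some "related_to"
           else some "associated_with"
         else some "associated_with"
       else if type1 = "person" ∧ type2 = "person" then
         if (["family", "married", "parent", "child"].any fun word => PySem.Str.isIn word text_lower) then
           some "related_to"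
         else some "associated_with"
       else some "associated_with" : Option String)
    = pvScanRules (t1, t2) (pvTopicsOf text) pvPairRules := by
  simp only [pvScanRules, pvPairRules, pv_cont_emp, pv_cont_loc, pv_cont_fam]
  cases hW : (["work", "job", "employee", "staff"].any fun word => PySem.Str.isIn word (PySem.Str.lower text)) <;>
  cases hL : (["located", "based", "headquarters"].any fun word => PySem.Str.isIn word (PySem.Str.lower text)) <;>
  cases hF : (["family", "married", "parent", "child"].any fun word => PySem.Str.isIn word (PySem.Str.lower text)) <;>
  (try simp only [hW, hL, hF]) <;>
  split_ifs <;> (try simp_all [Prod.mk.injEq])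

-- ===== VERDICT (by name: the statement is the Claim_ definition above) =====
theorem infer_relation_type_py_spec : Claim_equal_infer_relation_type_py := by
  intro e1 e2 text _
  unfold Spec_infer_relation_type_py infer_relation_type_py infer_relation_type_py_alt
  exact pv_core _ _ text
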